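-- pv_equiv track=rewrite | github.com/mithunpaul08/fever-baselines | src/rte/mithun/trainer.py | hedging_features
-- ===== SOURCE A (Python) =====
-- def hedging_features(clean_headline, clean_body):
--
--     #todo: do hedging features for headline. Have one for headline and one for body...note : have as separate vectors
--
--     hedging_words = [
--         'allegedly',
--         'reportedly',
--       'argue',
--       'argument',
--       'believe',
--       'belief',
--       'conjecture',
--       'consider',
--       'hint',
--       'hypothesis',
--       'hypotheses',
--       'hypothesize',
--       'implication',
--       'imply',
--       'indicate',
--       'predict',
--       'prediction',
--       'previous',
--       'previously',
--       'proposal',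
--       'propose',
--       'question',
--       'speculate',
--       'speculation',
--       'suggest',
--       'suspect',
--       'theorize',
--       'theory',
--       'think',
--       'whether'
--     ]
--
--     length_hedge=len(hedging_words)
--     hedging_body_vector = [0] * length_hedge
--
--
--
--     for word in clean_body:
--         if word in hedging_words:
--             index=hedging_words.index(word)
--             hedging_body_vector[index]=1
--
--
--     return hedging_body_vector
-- ===== SOURCE B (Python) =====
-- def hedging_features(clean_headline, clean_body):
--     hedging_words = [
--         'allegedly', 'reportedly', 'argue', 'argument', 'believe', 'belief',
--         'conjecture', 'consider', 'hint', 'hypothesis', 'hypotheses',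
--         'hypothesize', 'implication', 'imply', 'indicate', 'predict',
--         'prediction', 'previous', 'previously', 'proposal', 'propose',
--         'question', 'speculate', 'speculation', 'suggest', 'suspect',
--         'theorize', 'theory', 'think', 'whether'
--     ]
--     body_set = set(clean_body)
--     return [1 if w in body_set else 0 for w in hedging_words]
-- ===== Notes on version B (the rewrite author's own statement) =====
-- stated objective: faster
-- what changed: B builds a hash set of the body once and iterates over the fixed vocabulary positionally, instead of looping over the body with a linear membership test plus a second linear .index scan per hit.
import Mathlib
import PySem

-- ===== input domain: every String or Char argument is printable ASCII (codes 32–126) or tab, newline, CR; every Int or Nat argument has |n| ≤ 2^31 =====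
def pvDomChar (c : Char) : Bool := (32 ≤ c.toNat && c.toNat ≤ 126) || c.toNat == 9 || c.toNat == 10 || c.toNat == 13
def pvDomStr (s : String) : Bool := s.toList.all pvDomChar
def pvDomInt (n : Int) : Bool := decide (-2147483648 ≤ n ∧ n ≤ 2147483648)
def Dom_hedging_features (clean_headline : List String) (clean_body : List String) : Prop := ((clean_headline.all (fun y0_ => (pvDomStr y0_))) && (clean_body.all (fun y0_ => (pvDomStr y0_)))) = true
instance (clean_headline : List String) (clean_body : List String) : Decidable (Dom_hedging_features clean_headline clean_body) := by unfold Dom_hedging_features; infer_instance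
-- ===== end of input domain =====

-- B replaces A's body loop (linear `in` test + a second `.index` scan per hit) by one
-- membership set over the body and a positional pass over the fixed vocabulary (faster).

-- the fixed vocabulary, shared verbatim by both ports
def hedgingWords : List String :=
  ["allegedly", "reportedly", "argue", "argument", "believe", "belief",
   "conjecture", "consider", "hint", "hypothesis", "hypotheses",
   "hypothesize", "implication", "imply", "indicate", "predict",
   "prediction", "previous", "previously", "proposal", "propose",
   "question", "speculate", "speculation", "suggest", "suspect",
   "theorize", "theory", "think", "whether"]

-- ===== PORT A =====
def hedging_features (clean_headline : List String) (clean_body : List String) : List Int :=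
  let length_hedge := hedgingWords.length
  let init := List.replicate length_hedge (0 : Int)
  clean_body.foldl (fun vec word =>
    if word ∈ hedgingWords then
      match PySem.List.index? hedgingWords word with
      | some idx => vec.set idx 1
      | none => vec
    else vec) init

-- ===== PORT B =====
def hedging_features_alt (clean_headline : List String) (clean_body : List String) : List Int :=
  let body_set : PySem.Set String := PySem.Set.ofList clean_body
  hedgingWords.map (fun w => if PySem.Set.contains body_set w then (1 : Int) else 0)

-- ===== PRECONDITION & SPEC =====
def Spec_hedging_features (clean_headline : List String) (clean_body : List String) (out : List Int) : Prop := out = hedging_features_alt clean_headline clean_body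
instance (clean_headline : List String) (clean_body : List String) (out : List Int) : Decidable (Spec_hedging_features clean_headline clean_body out) := by unfold Spec_hedging_features; infer_instance

-- ===== CLAIM (what is proved, stated in full; the proofs are below) =====
def Claim_equal_hedging_features : Prop := ∀ (clean_headline : List String) (clean_body : List String), Dom_hedging_features clean_headline clean_body → Spec_hedging_features clean_headline clean_body (hedging_features clean_headline clean_body)

-- ===== LEMMAS AND PROOFS =====

theorem hedgingWords_nodup : hedgingWords.Nodup := by decide

-- setting position k (where l[k] = x) of a 0/1-map over a nodup list flips exactly x's bit
theorem set_map_nodup (l : List String) (hl : l.Nodup) (p : String → Bool) (x : String)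
    (k : Nat) (hk : k < l.length) (hxk : l[k] = x) :
    (l.map (fun w => if p w then (1 : Int) else 0)).set k 1
      = l.map (fun w => if (p w || w == x) then (1 : Int) else 0) := by
  apply List.ext_getElem
  · simp
  · intro i hi hi'
    simp only [List.length_map] at hi'
    simp only [List.getElem_set, List.getElem_map, List.length_map]
    by_cases h : k = i
    · subst h; simp [hxk]
    · have hne : l[i] ≠ x := by
        intro he
        exact h ((List.Nodup.getElem_inj_iff hl).mp (by rw [he, hxk]))
      simp [h, hne]

-- loop invariant: folding A's body step over `body` starting from a 0/1-map with
-- predicate p yields the 0/1-map with predicate (p ∨ membership in body)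
theorem foldl_step (body : List String) : ∀ (p : String → Bool),
    body.foldl (fun vec word =>
      if word ∈ hedgingWords then
        match PySem.List.index? hedgingWords word with
        | some idx => vec.set idx 1
        | none => vec
      else vec) (hedgingWords.map (fun w => if p w then (1 : Int) else 0))
    = hedgingWords.map (fun w => if (p w || body.contains w) then (1 : Int) else 0) := by
  induction body with
  | nil => intro p; simp
  | cons word rest ih =>
    intro p
    simp only [List.foldl_cons]
    by_cases hm : word ∈ hedgingWords
    · have hsome : (PySem.List.index? hedgingWords word).isSome := by
        rw [PySem.List.index?_isSome_iff]; exact hm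
      obtain ⟨k, hidx⟩ := Option.isSome_iff_exists.mp hsome
      obtain ⟨hk, hxk, -⟩ := PySem.List.getElem_of_index?_eq_some hidx
      have hstep : (if word ∈ hedgingWords then
          (match PySem.List.index? hedgingWords word with
           | some idx => (hedgingWords.map (fun w => if p w then (1 : Int) else 0)).set idx 1
           | none => hedgingWords.map (fun w => if p w then (1 : Int) else 0))
          else hedgingWords.map (fun w => if p w then (1 : Int) else 0))
          = (hedgingWords.map (fun w => if p w then (1 : Int) else 0)).set k 1 := by
        rw [if_pos hm, hidx]
      rw [hstep, set_map_nodup hedgingWords hedgingWords_nodup p word k hk hxk]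
      rw [ih (fun w => p w || w == word)]
      apply List.map_congr_left
      intro w _
      simp [Bool.or_assoc, or_assoc]
    · rw [if_neg hm, ih p]
      apply List.map_congr_left
      intro w hw
      have hne : w ≠ word := by rintro rfl; exact hm hw
      simp [hne]

-- ===== VERDICT (by name: the statement is the Claim_ definition above) =====
theorem hedging_features_spec : Claim_equal_hedging_features := by
  intro clean_headline clean_body _
  unfold Spec_hedging_features hedging_features hedging_features_alt
  have hrep : List.replicate hedgingWords.length (0 : Int)
      = hedgingWords.map (fun w => if (fun _ : String => false) w then (1 : Int) else 0) := by
    simp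
  simp only [hrep]
  rw [foldl_step clean_body (fun _ => false)]
  apply List.map_congr_left
  intro w _
  have : PySem.Set.contains (PySem.Set.ofList clean_body) w = clean_body.contains w := by
    rcases h : clean_body.contains w with _ | _
    · simp only [List.contains_eq_mem, decide_eq_false_iff_not] at h
      simp [PySem.Set.contains_iff, PySem.Set.mem_ofList, h]
    · simp only [List.contains_eq_mem, decide_eq_true_eq] at h
      simp [PySem.Set.contains_iff, PySem.Set.mem_ofList, h]
  rw [this]
  simp
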